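-- pv_equiv track=rewrite | github.com/mecp2-project/Dolia | scripts/utility.py | peaks_to_segments
-- ===== SOURCE A (Python) =====
-- HIGH_TYPE = "high"
--
-- LOW_TYPE = "low"
--
-- def peaks_to_segments(highs, lows):
-- 	"""
-- 	Derive full segments from the lists of high and low peaks.
--
-- 	A segment is a pair of peaks such that the first one is high, the second is low, and there are no other peaks in between.
--
-- 	The output is a tuple of lists of tuples representing segments.
-- 	"""
--
-- 	# short circuit if one of the lists is empty (no segments can exist)
-- 	if len(highs) == 0 or len(lows) == 0:
-- 		return []
--
-- 	# attach the origin to a peak value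
-- 	highs = list(map(lambda x: {"value": x, "tag": HIGH_TYPE}, highs))
-- 	lows = list(map(lambda x: {"value": x, "tag": LOW_TYPE}, lows))
--
-- 	# merge peaks
-- 	both = highs + lows
--
-- 	# sort by value (but keep origin)
-- 	both.sort(key=lambda x: x["value"])
--
-- 	segments = []
--
-- 	# for every two consecutive peaks, if they form a segment, save it
-- 	for i in range(len(both)):
-- 		if i != 0:
-- 			if both[i - 1]["tag"] == HIGH_TYPE and both[i]["tag"] == LOW_TYPE:
-- 				segments += [(both[i - 1]["value"], both[i]["value"])]
--
-- 	return segments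
-- ===== SOURCE B (Python) =====
-- def peaks_to_segments(highs, lows):
--     """Sort the two peak lists separately (plain int sorts, no key function,
--     no dict wrappers) and do a single linear merge pass, emitting a segment
--     whenever a low peak immediately follows a high peak; ties put highs first,
--     matching the stable sort of highs+lows."""
--     sh = sorted(highs)
--     sl = sorted(lows)
--     segments = []
--     i = 0
--     j = 0
--     prev_high = None
--     while i < len(sh) or j < len(sl):
--         if j >= len(sl) or (i < len(sh) and sh[i] <= sl[j]):
--             prev_high = sh[i]
--             i += 1
--         else:
--             if prev_high is not None:
--                 segments.append((prev_high, sl[j]))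
--             prev_high = None
--             j += 1
--     return segments
-- ===== Notes on version B (the rewrite author's own statement) =====
-- stated objective: faster
-- what changed: Instead of wrapping every peak in a tag dict and sorting the combined list with a key lambda then scanning adjacent pairs, B sorts the two int lists separately (plain sorts, no key, no dict objects) and finds the high->low adjacencies in one linear merge pass that tracks the previous high.
import Mathlib
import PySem

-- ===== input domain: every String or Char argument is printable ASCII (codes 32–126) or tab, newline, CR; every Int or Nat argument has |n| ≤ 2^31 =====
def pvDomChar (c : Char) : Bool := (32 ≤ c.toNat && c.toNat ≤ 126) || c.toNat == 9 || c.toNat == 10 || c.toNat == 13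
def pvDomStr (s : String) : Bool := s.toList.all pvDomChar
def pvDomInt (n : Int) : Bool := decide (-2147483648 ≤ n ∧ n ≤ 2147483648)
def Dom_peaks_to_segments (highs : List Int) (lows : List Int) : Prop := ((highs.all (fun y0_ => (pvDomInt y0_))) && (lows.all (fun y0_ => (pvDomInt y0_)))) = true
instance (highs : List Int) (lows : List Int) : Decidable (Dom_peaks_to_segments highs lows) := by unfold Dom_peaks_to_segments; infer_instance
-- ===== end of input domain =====

-- B sorts the two int lists separately and finds high->low adjacencies in one
-- linear merge pass, instead of A's key-sort of a combined tagged list + index scan.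

-- ===== PORT A =====
-- the Python dict {"value": x, "tag": t} is ported as the pair (x, t) : Int × String
def peaks_to_segments (highs : List Int) (lows : List Int) : List (Int × Int) :=
  if highs.length = 0 ∨ lows.length = 0 then []
  else
    let highs' : List (Int × String) := highs.map (fun x => (x, "high"))
    let lows' : List (Int × String) := lows.map (fun x => (x, "low"))
    let both := highs' ++ lows'
    let both := PySem.List.sorted both (fun x => x.1)
    (PySem.List.pyRange 0 (PySem.List.len both) 1).foldl
      (fun segments i =>
        if i ≠ 0 then
          if (PySem.List.pyGetD both (i-1) (0, "")).2 = "high" ∧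
             (PySem.List.pyGetD both i (0, "")).2 = "low" then
            segments ++ [((PySem.List.pyGetD both (i-1) (0, "")).1,
                          (PySem.List.pyGetD both i (0, "")).1)]
          else segments
        else segments) []

-- ===== PORT B =====
-- the while-loop of Source B over indices i (into sh), j (into sl) and prev_high
def pvMergeLoop : List Int → List Int → Option Int → List (Int × Int)
  | h :: hs, l :: ls, prev =>
      if h ≤ l then pvMergeLoop hs (l :: ls) (some h)
      else
        match prev with
        | some p => (p, l) :: pvMergeLoop (h :: hs) ls none
        | none => pvMergeLoop (h :: hs) ls none
  | h :: hs, [], _ => pvMergeLoop hs [] (some h)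
  | [], l :: ls, prev =>
      match prev with
      | some p => (p, l) :: pvMergeLoop [] ls none
      | none => pvMergeLoop [] ls none
  | [], [], _ => []

def peaks_to_segments_alt (highs : List Int) (lows : List Int) : List (Int × Int) :=
  pvMergeLoop (PySem.List.sorted highs (fun x => x))
    (PySem.List.sorted lows (fun x => x)) none

-- ===== PRECONDITION & SPEC =====
def Spec_peaks_to_segments (highs : List Int) (lows : List Int) (out : List (Int × Int)) : Prop := out = peaks_to_segments_alt highs lows
instance (highs : List Int) (lows : List Int) (out : List (Int × Int)) : Decidable (Spec_peaks_to_segments highs lows out) := by unfold Spec_peaks_to_segments; infer_instance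

-- ===== CLAIM (what is proved, stated in full; the proofs are below) =====
def Claim_equal_peaks_to_segments : Prop := ∀ (highs : List Int) (lows : List Int), Dom_peaks_to_segments highs lows → Spec_peaks_to_segments highs lows (peaks_to_segments highs lows)

-- ===== LEMMAS AND PROOFS =====

-- the adjacent-pair scan of A, as a structural recursion
def pvSegs : List (Int × String) → List (Int × Int)
  | a :: b :: rest =>
      (if a.2 = "high" ∧ b.2 = "low" then [(a.1, b.1)] else []) ++ pvSegs (b :: rest)
  | _ => []

-- the tagged merge of two sorted peak lists (highs first at ties)
def pvMerge : List Int → List Int → List (Int × String)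
  | h :: hs, l :: ls =>
      if h ≤ l then (h, "high") :: pvMerge hs (l :: ls)
      else (l, "low") :: pvMerge (h :: hs) ls
  | h :: hs, [] => (h, "high") :: pvMerge hs []
  | [], l :: ls => (l, "low") :: pvMerge [] ls
  | [], [] => []

-- the strong "sorted with ties resolved high-before-low" order
def pvR (a b : Int × String) : Prop :=
  a.1 < b.1 ∨ (a.1 = b.1 ∧ (a.2 = b.2 ∨ (a.2 = "high" ∧ b.2 = "low")))

lemma pvR_antisymm (a b : Int × String) (h1 : pvR a b) (h2 : pvR b a) : a = b := by
  obtain ⟨av, at'⟩ := a; obtain ⟨bv, bt⟩ := b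
  simp only [pvR] at h1 h2
  have hv : av = bv := by rcases h1 with h | ⟨h, _⟩ <;> rcases h2 with h' | ⟨h', _⟩ <;> omega
  subst hv
  rcases h1 with h1 | ⟨_, h1⟩; · omega
  rcases h2 with h2 | ⟨_, h2⟩; · omega
  rcases h1 with h1 | ⟨ha, hb⟩ <;> rcases h2 with h2 | ⟨hc, hd⟩ <;> simp_all

lemma pvSegs_low_cons (v : Int) (rest : List (Int × String)) :
    pvSegs ((v, "low") :: rest) = pvSegs rest := by
  cases rest with
  | nil => rfl
  | cons b r => simp [pvSegs]

lemma pvSegs_high_absorb (ctx : List (Int × String)) (h : Int) (rest : List (Int × String))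
    (hctx : ctx = [] ∨ ∃ p, ctx = [(p, "high")]) :
    pvSegs (ctx ++ (h, "high") :: rest) = pvSegs ((h, "high") :: rest) := by
  rcases hctx with h0 | ⟨p, hp⟩ <;> subst_vars <;> simp [pvSegs]

lemma pvMergeLoop_eq_segs : ∀ (sh sl : List Int) (prev : Option Int)
    (ctx : List (Int × String))
    (_ : (prev = none ∧ ctx = []) ∨ ∃ p, prev = some p ∧ ctx = [(p, "high")]),
    pvMergeLoop sh sl prev = pvSegs (ctx ++ pvMerge sh sl)
  | h :: hs, l :: ls, prev, ctx, hctx => by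
      by_cases hle : h ≤ l
      · rw [pvMergeLoop.eq_def]
        simp only [hle, if_true]
        rw [pvMerge, if_pos hle,
          pvSegs_high_absorb ctx h _ (by rcases hctx with ⟨_, h0⟩ | ⟨p, _, hp⟩; exacts [Or.inl h0, Or.inr ⟨p, hp⟩]),
          ← List.singleton_append]
        exact pvMergeLoop_eq_segs hs (l :: ls) (some h) [(h, "high")] (Or.inr ⟨h, rfl, rfl⟩)
      · rw [pvMergeLoop.eq_def]
        simp only [hle, if_false]
        rw [pvMerge, if_neg hle]
        rcases hctx with ⟨hp, h0⟩ | ⟨p, hp, h0⟩ <;> subst_vars <;> dsimp only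
        · rw [List.nil_append, pvSegs_low_cons]
          exact pvMergeLoop_eq_segs (h :: hs) ls none [] (Or.inl ⟨rfl, rfl⟩)
        · show _ = pvSegs ((p, "high") :: (l, "low") :: pvMerge (h :: hs) ls)
          rw [pvSegs, pvSegs_low_cons]
          rw [pvMergeLoop_eq_segs (h :: hs) ls none [] (Or.inl ⟨rfl, rfl⟩)]
          simp
  | h :: hs, [], prev, ctx, hctx => by
      rw [pvMergeLoop.eq_def]
      rw [pvMerge,
        pvSegs_high_absorb ctx h _ (by rcases hctx with ⟨_, h0⟩ | ⟨p, _, hp⟩; exacts [Or.inl h0, Or.inr ⟨p, hp⟩]),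
        ← List.singleton_append]
      exact pvMergeLoop_eq_segs hs [] (some h) [(h, "high")] (Or.inr ⟨h, rfl, rfl⟩)
  | [], l :: ls, prev, ctx, hctx => by
      rw [pvMergeLoop.eq_def, pvMerge]
      rcases hctx with ⟨hp, h0⟩ | ⟨p, hp, h0⟩ <;> subst_vars <;> dsimp only
      · rw [List.nil_append, pvSegs_low_cons]
        exact pvMergeLoop_eq_segs [] ls none [] (Or.inl ⟨rfl, rfl⟩)
      · show _ = pvSegs ((p, "high") :: (l, "low") :: pvMerge [] ls)
        rw [pvSegs, pvSegs_low_cons]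
        rw [pvMergeLoop_eq_segs [] ls none [] (Or.inl ⟨rfl, rfl⟩)]
        simp
  | [], [], prev, ctx, _hctx => by
      rw [pvMergeLoop.eq_def]
      rcases _hctx with ⟨hp, h0⟩ | ⟨p, hp, h0⟩ <;> subst_vars <;> dsimp only <;> simp [pvMerge, pvSegs]
  termination_by sh sl _ _ _ => sh.length + sl.length

lemma pvMergeLoop_nil_right : ∀ (sh : List Int) (prev : Option Int),
    pvMergeLoop sh [] prev = []
  | [], _ => by rw [pvMergeLoop.eq_def]
  | h :: hs, prev => by
      rw [pvMergeLoop.eq_def]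
      exact pvMergeLoop_nil_right hs (some h)

lemma pvMergeLoop_nil_left : ∀ (sl : List Int), pvMergeLoop [] sl none = []
  | [] => by rw [pvMergeLoop.eq_def]
  | l :: ls => by
      rw [pvMergeLoop.eq_def]
      exact pvMergeLoop_nil_left ls

lemma pvSegs_short (bs : List (Int × String)) (h : bs.length ≤ 1) : pvSegs bs = [] := by
  match bs with
  | [] => rfl
  | [a] => rfl
  | a :: b :: r => simp at h

lemma pvSegs_snoc : ∀ (ys : List (Int × String)) (a : Int × String),
    pvSegs (ys ++ [a]) = pvSegs ys ++
      (match ys.getLast? with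
       | some p => if p.2 = "high" ∧ a.2 = "low" then [(p.1, a.1)] else []
       | none => [])
  | [], a => by simp [pvSegs]
  | [y], a => by simp [pvSegs]
  | y :: z :: ys, a => by
      have ih := pvSegs_snoc (z :: ys) a
      simp only [List.cons_append] at ih ⊢
      rw [pvSegs, pvSegs, ih, List.getLast?_cons_cons, List.append_assoc]

lemma pvLoopA (bs : List (Int × String)) :
    ∀ (n : Nat), n ≤ bs.length → ∀ acc : List (Int × Int),
    (PySem.List.pyRange 0 (n : Int) 1).foldl
      (fun segments i =>
        if i ≠ 0 then
          if (PySem.List.pyGetD bs (i-1) (0, "")).2 = "high" ∧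
             (PySem.List.pyGetD bs i (0, "")).2 = "low" then
            segments ++ [((PySem.List.pyGetD bs (i-1) (0, "")).1,
                          (PySem.List.pyGetD bs i (0, "")).1)]
          else segments
        else segments) acc
    = acc ++ pvSegs (bs.take n) := by
  intro n
  induction n with
  | zero => intro _ acc; simp [PySem.List.pyRange_one_eq_nil le_rfl, pvSegs]
  | succ m ih =>
    intro hle acc
    have hm : m ≤ bs.length := Nat.le_of_succ_le hle
    have hmlt : m < bs.length := hle
    have hcast : ((m + 1 : Nat) : Int) = (m : Int) + 1 := by push_cast; ring
    rw [hcast, PySem.List.pyRange_one_succ_right (by positivity), List.foldl_append, ih hm acc]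
    simp only [List.foldl_cons, List.foldl_nil]
    rcases Nat.eq_zero_or_pos m with hm0 | hmpos
    · subst hm0
      have e1 : pvSegs (bs.take 1) = [] := pvSegs_short _ (by simp)
      have e0 : pvSegs (bs.take 0) = [] := rfl
      norm_num [e0, e1]
      rfl
    · have hne : (m : Int) ≠ 0 := by positivity
      rw [if_pos hne]
      obtain ⟨k, hk⟩ : ∃ k, m = k + 1 := ⟨m - 1, (Nat.succ_pred_eq_of_pos hmpos).symm⟩
      have h1 : (m : Int) - 1 = ((k : Nat) : Int) := by subst hk; push_cast; ring
      have hkm : k < bs.length := by omega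
      rw [h1, PySem.List.pyGetD_natCast, PySem.List.pyGetD_natCast,
        List.getD_eq_getElem bs _ hkm, List.getD_eq_getElem bs _ hmlt]
      have htake : bs.take (m + 1) = bs.take m ++ [bs[m]] := by
        rw [List.take_add_one]
        congr 1
        simp [List.getElem?_eq_getElem hmlt]
      have hlast : (bs.take m).getLast? = some bs[k] := by
        rw [List.getLast?_eq_getElem?, List.length_take]
        have : min m bs.length = m := by omega
        rw [this, hk]
        simp only [Nat.add_sub_cancel]
        rw [List.getElem?_take]
        simp [List.getElem?_eq_getElem hkm]
      rw [htake, pvSegs_snoc, hlast]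
      dsimp only
      split_ifs with hcond
      · rw [List.append_assoc]
      · simp

-- stability of the insertion sort: ties keep insertion order, so highs (inserted first) precede lows
lemma pvR_le (a b : Int × String) (h : pvR a b) : a.1 ≤ b.1 := by
  rcases h with h | ⟨h, _⟩ <;> omega

lemma pvInsertBy_pairwise : ∀ (x : Int × String) (acc : List (Int × String)),
    acc.Pairwise pvR →
    (∀ y ∈ acc, y.2 = x.2 ∨ (y.2 = "high" ∧ x.2 = "low")) →
    (PySem.List.insertBy (fun a b => decide (a.1 < b.1)) x acc).Pairwise pvR
  | x, [], _, _ => by simp [PySem.List.insertBy]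
  | x, y :: ys, hacc, htag => by
      rw [PySem.List.insertBy]
      by_cases hxy : x.1 < y.1
      · simp only [hxy, if_pos, decide_true]
        refine List.Pairwise.cons ?_ hacc
        intro z hz
        rcases List.mem_cons.mp hz with rfl | hz
        · exact Or.inl hxy
        · have := List.rel_of_pairwise_cons hacc hz
          exact Or.inl (lt_of_lt_of_le hxy (pvR_le _ _ this))
      · simp only [hxy, decide_false, Bool.false_eq_true, if_false]
        refine List.Pairwise.cons ?_
          (pvInsertBy_pairwise x ys hacc.of_cons (fun z hz => htag z (List.mem_cons_of_mem y hz)))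
        intro z hz
        rw [PySem.List.mem_insertBy] at hz
        rcases hz with rfl | hz
        · rcases lt_or_eq_of_le (not_lt.mp hxy) with h | h
          · exact Or.inl h
          · rcases htag y (List.mem_cons_self) with ht | ⟨ht1, ht2⟩
            · exact Or.inr ⟨h, Or.inl ht⟩
            · exact Or.inr ⟨h, Or.inr ⟨ht1, ht2⟩⟩
        · exact List.rel_of_pairwise_cons hacc hz

lemma pvFoldPhase : ∀ (vs : List Int) (t : String) (acc : List (Int × String)),
    acc.Pairwise pvR →
    (∀ y ∈ acc, y.2 = t ∨ (y.2 = "high" ∧ t = "low")) →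
    (vs.foldl (fun acc v => PySem.List.insertBy (fun a b => decide (a.1 < b.1)) (v, t) acc) acc).Pairwise pvR ∧
    ∀ y ∈ vs.foldl (fun acc v => PySem.List.insertBy (fun a b => decide (a.1 < b.1)) (v, t) acc) acc,
      y ∈ acc ∨ y.2 = t
  | [], t, acc, hacc, hmem => ⟨hacc, fun y hy => Or.inl hy⟩
  | v :: vs, t, acc, hacc, hmem => by
      simp only [List.foldl_cons]
      have hacc' := pvInsertBy_pairwise (v, t) acc hacc hmem
      have hmem' : ∀ y ∈ PySem.List.insertBy (fun a b => decide (a.1 < b.1)) (v, t) acc,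
          y.2 = t ∨ (y.2 = "high" ∧ t = "low") := by
        intro y hy
        rw [PySem.List.mem_insertBy] at hy
        rcases hy with rfl | hy
        · exact Or.inl rfl
        · exact hmem y hy
      obtain ⟨hp, hm⟩ := pvFoldPhase vs t _ hacc' hmem'
      refine ⟨hp, fun y hy => ?_⟩
      rcases hm y hy with hy' | hy'
      · rw [PySem.List.mem_insertBy] at hy'
        rcases hy' with rfl | hy'
        · exact Or.inr rfl
        · exact Or.inl hy'
      · exact Or.inr hy'

lemma pvSortedBoth_pairwise (highs lows : List Int) :
    (PySem.List.sorted (highs.map (fun x => (x, "high")) ++ lows.map (fun x => (x, "low")))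
      (fun x => x.1)).Pairwise pvR := by
  rw [PySem.List.sorted_eq_foldl_insertBy, List.foldl_append, List.foldl_map, List.foldl_map]
  obtain ⟨hp1, hm1⟩ := pvFoldPhase highs "high" [] (List.Pairwise.nil) (by simp)
  obtain ⟨hp2, _⟩ := pvFoldPhase lows "low" _ hp1 (fun y hy => by
    rcases hm1 y hy with h | h
    · simp at h
    · exact Or.inr ⟨h, rfl⟩)
  exact hp2

lemma pvMerge_mem : ∀ (sh sl : List Int) (z : Int × String), z ∈ pvMerge sh sl →
    (z.2 = "high" ∧ z.1 ∈ sh) ∨ (z.2 = "low" ∧ z.1 ∈ sl)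
  | h :: hs, l :: ls, z, hz => by
      rw [pvMerge] at hz
      split_ifs at hz with hle
      · rcases List.mem_cons.mp hz with rfl | hz
        · exact Or.inl ⟨rfl, List.mem_cons_self⟩
        · rcases pvMerge_mem hs (l :: ls) z hz with ⟨h1, h2⟩ | h'
          · exact Or.inl ⟨h1, List.mem_cons_of_mem h h2⟩
          · exact Or.inr h'
      · rcases List.mem_cons.mp hz with rfl | hz
        · exact Or.inr ⟨rfl, List.mem_cons_self⟩
        · rcases pvMerge_mem (h :: hs) ls z hz with h' | ⟨h1, h2⟩
          · exact Or.inl h'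
          · exact Or.inr ⟨h1, List.mem_cons_of_mem l h2⟩
  | h :: hs, [], z, hz => by
      rw [pvMerge] at hz
      rcases List.mem_cons.mp hz with rfl | hz
      · exact Or.inl ⟨rfl, List.mem_cons_self⟩
      · rcases pvMerge_mem hs [] z hz with ⟨h1, h2⟩ | ⟨_, h2⟩
        · exact Or.inl ⟨h1, List.mem_cons_of_mem h h2⟩
        · simp at h2
  | [], l :: ls, z, hz => by
      rw [pvMerge] at hz
      rcases List.mem_cons.mp hz with rfl | hz
      · exact Or.inr ⟨rfl, List.mem_cons_self⟩
      · rcases pvMerge_mem [] ls z hz with ⟨_, h2⟩ | ⟨h1, h2⟩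
        · simp at h2
        · exact Or.inr ⟨h1, List.mem_cons_of_mem l h2⟩
  | [], [], z, hz => by rw [pvMerge] at hz; simp at hz
  termination_by sh sl _ _ => sh.length + sl.length

lemma pvMerge_pairwise : ∀ (sh sl : List Int),
    sh.Pairwise (· ≤ ·) → sl.Pairwise (· ≤ ·) → (pvMerge sh sl).Pairwise pvR
  | h :: hs, l :: ls, hsh, hsl => by
      rw [pvMerge]
      split_ifs with hle
      · refine List.Pairwise.cons ?_ (pvMerge_pairwise hs (l :: ls) hsh.of_cons hsl)
        intro z hz
        rcases pvMerge_mem hs (l :: ls) z hz with ⟨ht, hv⟩ | ⟨ht, hv⟩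
        · have : h ≤ z.1 := List.rel_of_pairwise_cons hsh hv
          rcases lt_or_eq_of_le this with h' | h'
          · exact Or.inl h'
          · exact Or.inr ⟨h', Or.inl ht.symm⟩
        · have : h ≤ z.1 := by
            rcases List.mem_cons.mp hv with he | hv
            · rw [he]; exact hle
            · exact le_trans hle (List.rel_of_pairwise_cons hsl hv)
          rcases lt_or_eq_of_le this with h' | h'
          · exact Or.inl h'
          · exact Or.inr ⟨h', Or.inr ⟨rfl, ht⟩⟩
      · refine List.Pairwise.cons ?_ (pvMerge_pairwise (h :: hs) ls hsh hsl.of_cons)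
        intro z hz
        rcases pvMerge_mem (h :: hs) ls z hz with ⟨ht, hv⟩ | ⟨ht, hv⟩
        · have : h ≤ z.1 := by
            rcases List.mem_cons.mp hv with he | hv
            · rw [he]
            · exact List.rel_of_pairwise_cons hsh hv
          exact Or.inl (lt_of_lt_of_le (not_le.mp hle) this)
        · have : l ≤ z.1 := List.rel_of_pairwise_cons hsl hv
          rcases lt_or_eq_of_le this with h' | h'
          · exact Or.inl h'
          · exact Or.inr ⟨h', Or.inl ht.symm⟩
  | h :: hs, [], hsh, _ => by
      rw [pvMerge]
      refine List.Pairwise.cons ?_ (pvMerge_pairwise hs [] hsh.of_cons List.Pairwise.nil)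
      intro z hz
      rcases pvMerge_mem hs [] z hz with ⟨ht, hv⟩ | ⟨_, hv⟩
      · have : h ≤ z.1 := List.rel_of_pairwise_cons hsh hv
        rcases lt_or_eq_of_le this with h' | h'
        · exact Or.inl h'
        · exact Or.inr ⟨h', Or.inl ht.symm⟩
      · simp at hv
  | [], l :: ls, _, hsl => by
      rw [pvMerge]
      refine List.Pairwise.cons ?_ (pvMerge_pairwise [] ls List.Pairwise.nil hsl.of_cons)
      intro z hz
      rcases pvMerge_mem [] ls z hz with ⟨_, hv⟩ | ⟨ht, hv⟩
      · simp at hv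
      · have : l ≤ z.1 := List.rel_of_pairwise_cons hsl hv
        rcases lt_or_eq_of_le this with h' | h'
        · exact Or.inl h'
        · exact Or.inr ⟨h', Or.inl ht.symm⟩
  | [], [], _, _ => by rw [pvMerge]; exact List.Pairwise.nil
  termination_by sh sl _ _ => sh.length + sl.length

lemma pvMerge_perm : ∀ (sh sl : List Int),
    (pvMerge sh sl).Perm (sh.map (fun x => (x, "high")) ++ sl.map (fun x => (x, "low")))
  | h :: hs, l :: ls => by
      rw [pvMerge]
      split_ifs with hle
      · simpa using (pvMerge_perm hs (l :: ls)).cons (h, "high")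
      · refine ((pvMerge_perm (h :: hs) ls).cons (l, "low")).trans ?_
        exact List.perm_middle.symm
  | h :: hs, [] => by
      rw [pvMerge]
      simpa using (pvMerge_perm hs []).cons (h, "high")
  | [], l :: ls => by
      rw [pvMerge]
      simpa using (pvMerge_perm [] ls).cons (l, "low")
  | [], [] => by rw [pvMerge]; rfl
  termination_by sh sl => sh.length + sl.length

lemma pvSorted_eq_merge (highs lows : List Int) :
    PySem.List.sorted (highs.map (fun x => (x, "high")) ++ lows.map (fun x => (x, "low")))
      (fun x => x.1)
    = pvMerge (PySem.List.sorted highs (fun x => x)) (PySem.List.sorted lows (fun x => x)) := by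
  refine List.Perm.eq_of_pairwise (fun a b _ _ => pvR_antisymm a b)
    (pvSortedBoth_pairwise highs lows)
    (pvMerge_pairwise _ _ (PySem.List.sorted_pairwise highs (fun x => x))
      (PySem.List.sorted_pairwise lows (fun x => x))) ?_
  refine (PySem.List.sorted_perm _ _ _).trans ?_
  refine ((pvMerge_perm _ _).trans ?_).symm
  exact ((PySem.List.sorted_perm highs (fun x => x) false).map _).append
    ((PySem.List.sorted_perm lows (fun x => x) false).map _)

theorem peaks_to_segments_spec : Claim_equal_peaks_to_segments := by
  intro highs lows _
  unfold Spec_peaks_to_segments peaks_to_segments peaks_to_segments_alt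
  split_ifs with hc
  · rcases hc with hc | hc
    · rw [List.length_eq_zero_iff] at hc
      subst hc
      rw [show PySem.List.sorted ([] : List Int) (fun x => x) = [] from rfl,
        pvMergeLoop_nil_left]
    · rw [List.length_eq_zero_iff] at hc
      subst hc
      rw [show PySem.List.sorted ([] : List Int) (fun x => x) = [] from rfl,
        pvMergeLoop_nil_right]
  · simp only []
    rw [show PySem.List.len (PySem.List.sorted (highs.map (fun x => (x, "high")) ++ lows.map (fun x => (x, "low"))) (fun x => x.1)) = ((PySem.List.sorted (highs.map (fun x => (x, "high")) ++ lows.map (fun x => (x, "low"))) (fun x => x.1)).length : Int) from PySem.List.len_eq _]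
    rw [pvLoopA _ _ le_rfl []]
    rw [List.nil_append, List.take_length, pvSorted_eq_merge]
    exact (pvMergeLoop_eq_segs _ _ none [] (Or.inl ⟨rfl, rfl⟩)).symm
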